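-- pv_equiv track=rewrite | github.com/AustinBao/LeetCode | Contest/CCC/2019/Flipper.py | flipper
-- ===== SOURCE A (Python) =====
-- def flipper(instructions):
--     grid = [[1, 2],
--             [3, 4]]
--
--     for letter in instructions:
--         if letter == "H":
--             grid.reverse()
--         if letter == "V":
--             grid[0].reverse()
--             grid[1].reverse()
--
--     return grid
-- ===== SOURCE B (Python) =====
-- def flipper(instructions):
--     h = 0
--     v = 0
--     for letter in instructions:
--         if letter == "H":
--             h ^= 1
--         if letter == "V":
--             v ^= 1
--     if h == 0 and v == 0:
--         return [[1, 2], [3, 4]]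
--     if h == 1 and v == 0:
--         return [[3, 4], [1, 2]]
--     if h == 0 and v == 1:
--         return [[2, 1], [4, 3]]
--     return [[4, 3], [2, 1]]
-- ===== Notes on version B (the rewrite author's own statement) =====
-- stated objective: simpler
-- what changed: B replaces per-instruction grid mutation with a single pass accumulating H/V parities and a closed-form table lookup of the four possible final grids.
import Mathlib
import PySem

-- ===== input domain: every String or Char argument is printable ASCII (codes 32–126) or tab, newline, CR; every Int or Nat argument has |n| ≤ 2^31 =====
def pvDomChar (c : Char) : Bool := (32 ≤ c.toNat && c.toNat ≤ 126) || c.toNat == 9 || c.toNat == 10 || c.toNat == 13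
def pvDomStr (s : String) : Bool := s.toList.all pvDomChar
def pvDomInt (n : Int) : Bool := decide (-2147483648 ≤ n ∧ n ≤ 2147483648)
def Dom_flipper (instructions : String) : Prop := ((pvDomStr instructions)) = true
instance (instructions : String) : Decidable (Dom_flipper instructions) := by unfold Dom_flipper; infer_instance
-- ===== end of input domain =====

-- B replaces per-instruction grid mutation with parity counting plus a fixed table; objective: simpler.

-- ===== PORT A =====
-- one instruction step on the grid: 'H' reverses the row list, 'V' reverses rows 0 and 1 in place
def flipperStep (g : List (List Int)) (letter : Char) : List (List Int) :=
  let g := if letter = 'H' then g.reverse else g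
  if letter = 'V' then (g.set 0 (g.getD 0 []).reverse).set 1 ((g.getD 1 []).reverse) else g

def flipper (instructions : String) : List (List Int) :=
  instructions.toList.foldl flipperStep [[1, 2], [3, 4]]

-- ===== PORT B =====
def flipperAltStep (hv : Nat × Nat) (letter : Char) : Nat × Nat :=
  let hv := if letter = 'H' then (hv.1 ^^^ 1, hv.2) else hv
  if letter = 'V' then (hv.1, hv.2 ^^^ 1) else hv

def flipperTable (h v : Nat) : List (List Int) :=
  if h = 0 ∧ v = 0 then [[1, 2], [3, 4]]
  else if h = 1 ∧ v = 0 then [[3, 4], [1, 2]]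
  else if h = 0 ∧ v = 1 then [[2, 1], [4, 3]]
  else [[4, 3], [2, 1]]

def flipper_alt (instructions : String) : List (List Int) :=
  let p := instructions.toList.foldl flipperAltStep (0, 0)
  flipperTable p.1 p.2

-- ===== PRECONDITION & SPEC =====
def Spec_flipper (instructions : String) (out : List (List Int)) : Prop := out = flipper_alt instructions
instance (instructions : String) (out : List (List Int)) : Decidable (Spec_flipper instructions out) := by unfold Spec_flipper; infer_instance

-- ===== CLAIM (what is proved, stated in full; the proofs are below) =====
def Claim_equal_flipper : Prop := ∀ (instructions : String), Dom_flipper instructions → Spec_flipper instructions (flipper instructions)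

-- ===== LEMMAS AND PROOFS =====
theorem flipperStep_table (h v : Nat) (hh : h < 2) (hv : v < 2) (c : Char) :
    flipperStep (flipperTable h v) c =
      flipperTable (flipperAltStep (h, v) c).1 (flipperAltStep (h, v) c).2 := by
  interval_cases h <;> interval_cases v <;>
    simp only [flipperStep, flipperAltStep, flipperTable] <;>
    by_cases hH : c = 'H' <;> by_cases hV : c = 'V' <;>
    simp [hH, hV]

theorem flipper_foldl (cs : List Char) (h v : Nat) (hh : h < 2) (hv : v < 2) :
    cs.foldl flipperStep (flipperTable h v) =
      flipperTable (cs.foldl flipperAltStep (h, v)).1 (cs.foldl flipperAltStep (h, v)).2 := by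
  induction cs generalizing h v with
  | nil => rfl
  | cons c cs ih =>
    simp only [List.foldl_cons, flipperStep_table h v hh hv c]
    have h1 : (flipperAltStep (h, v) c).1 < 2 := by
      simp only [flipperAltStep]; split_ifs <;> interval_cases h <;> simp
    have h2 : (flipperAltStep (h, v) c).2 < 2 := by
      simp only [flipperAltStep]; split_ifs <;> interval_cases v <;> simp
    exact ih _ _ h1 h2

-- ===== VERDICT (by name: the statement is the Claim_ definition above) =====
theorem flipper_spec : Claim_equal_flipper := by
  intro s _
  unfold Spec_flipper flipper flipper_alt
  have := flipper_foldl s.toList 0 0 (by omega) (by omega)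
  simpa [flipperTable] using this
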